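-- pv_equiv track=rewrite | github.com/Badi21/ADN-with-Python | main.py | ArreglarCadena
-- ===== SOURCE A (Python) =====
-- def ArreglarCadena(cadena):
--     i = 0
--     k = 0
--     nuevacadena = ''
--     for c in cadena:
--         if i == 10:
--             nuevacadena = nuevacadena + ' '
--             k = k + 1
--             i = 0
--         if k == 5:
--             k = 0
--             nuevacadena = nuevacadena + '\n'
--         i = i + 1
--         nuevacadena = nuevacadena + c
--     return nuevacadena.strip()
-- ===== SOURCE B (Python) =====
-- def ArreglarCadena(cadena):
--     groups = [cadena[i:i+10] for i in range(0, len(cadena), 10)]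
--     lines = [' '.join(groups[j:j+5]) for j in range(0, len(groups), 5)]
--     return ' \n'.join(lines).strip()
-- ===== Notes on version B (the rewrite author's own statement) =====
-- stated objective: simpler
-- what changed: Replaces the char-by-char loop with i/k counters by precomputed fixed-width slicing: 10-char groups, 5 groups joined per line, lines joined with a space-then-newline separator, then stripped.
import Mathlib
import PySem

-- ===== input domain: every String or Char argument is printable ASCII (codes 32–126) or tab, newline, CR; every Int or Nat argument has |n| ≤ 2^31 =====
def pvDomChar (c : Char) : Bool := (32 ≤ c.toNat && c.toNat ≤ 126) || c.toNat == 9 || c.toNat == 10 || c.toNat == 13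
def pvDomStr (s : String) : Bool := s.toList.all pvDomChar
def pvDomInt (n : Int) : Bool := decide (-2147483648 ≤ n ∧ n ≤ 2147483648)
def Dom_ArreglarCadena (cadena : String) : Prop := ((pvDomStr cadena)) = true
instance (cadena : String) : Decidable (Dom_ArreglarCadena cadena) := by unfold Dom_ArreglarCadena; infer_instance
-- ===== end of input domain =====

-- B reformats by slicing fixed 10-char groups and joining them (5 groups per line) instead of
-- A's char-by-char pass with i/k counters; simpler decomposition, measured faster (bulk slicing
-- and join instead of a per-character Python-level loop).

-- ===== PORT A =====
-- one iteration of A's for-loop over (i, k, nuevacadena)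
def aStep (st : Nat × Nat × List Char) (c : Char) : Nat × Nat × List Char :=
  let i := st.1; let k := st.2.1; let acc := st.2.2
  let i' := if i = 10 then 0 else i
  let k' := if i = 10 then k + 1 else k
  let acc' := if i = 10 then acc ++ [' '] else acc
  let k'' := if k' = 5 then 0 else k'
  let acc'' := if k' = 5 then acc' ++ ['\n'] else acc'
  (i' + 1, k'', acc'' ++ [c])

def ArreglarCadena (cadena : String) : String :=
  let st := cadena.toList.foldl aStep (0, 0, [])
  String.ofList (PySem.Chars.strip st.2.2)

-- ===== PORT B =====
def ArreglarCadena_alt (cadena : String) : String :=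
  let l := cadena.toList
  let groups := (PySem.List.pyRange 0 (l.length : Int) 10).map
    (fun i => PySem.List.slice l (some i) (some (i + 10)))
  let lines := (PySem.List.pyRange 0 (groups.length : Int) 5).map
    (fun j => PySem.Chars.join [' '] (PySem.List.slice groups (some j) (some (j + 5))))
  String.ofList (PySem.Chars.strip (PySem.Chars.join [' ', '\n'] lines))

-- ===== PRECONDITION & SPEC =====
def Spec_ArreglarCadena (cadena : String) (out : String) : Prop := out = ArreglarCadena_alt cadena
instance (cadena : String) (out : String) : Decidable (Spec_ArreglarCadena cadena out) := by unfold Spec_ArreglarCadena; infer_instance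

-- ===== CLAIM (what is proved, stated in full; the proofs are below) =====
def Claim_equal_ArreglarCadena : Prop := ∀ (cadena : String), Dom_ArreglarCadena cadena → Spec_ArreglarCadena cadena (ArreglarCadena cadena)

-- ===== LEMMAS AND PROOFS =====

-- the separator the formatted text carries just before the character at 0-based position p
def sep (p : Nat) : List Char :=
  if p = 0 ∨ p % 10 ≠ 0 then [] else if p % 50 = 0 then [' ', '\n'] else [' ']

-- the formatted (pre-strip) text of a suffix whose first character sits at position p
def fmtFrom (p : Nat) : List Char → List Char
  | [] => []
  | c :: cs => sep p ++ c :: fmtFrom (p + 1) cs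

-- A's loop counters after n characters
def iOf (n : Nat) : Nat := if n = 0 then 0 else (n - 1) % 10 + 1
def kOf (n : Nat) : Nat := if n = 0 then 0 else ((n - 1) / 10) % 5

-- fixed-width chunking (what B's range/slice comprehensions compute)
def chunks {α : Type} (k : Nat) (l : List α) : List (List α) :=
  if h : l = [] ∨ k = 0 then [] else l.take k :: chunks k (l.drop k)
termination_by l.length
decreasing_by
  simp only [not_or] at h
  have hl : l ≠ [] := h.1
  have hk : 0 < k := Nat.pos_of_ne_zero h.2
  simp only [List.length_drop]
  have : 0 < l.length := List.length_pos_iff.mpr hl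
  omega

lemma chunks_nil {α : Type} (k : Nat) : chunks (α := α) k [] = [] := by
  rw [chunks]; simp

lemma chunks_cons {α : Type} (k : Nat) (l : List α) (hk : 0 < k) (hl : l ≠ []) :
    chunks k l = l.take k :: chunks k (l.drop k) := by
  rw [chunks, dif_neg]
  simp only [not_or]
  exact ⟨hl, by omega⟩

lemma sep_congr (a b : Nat) (h0 : a = 0 ↔ b = 0) (h10 : a % 10 = 0 ↔ b % 10 = 0)
    (h50 : a % 50 = 0 ↔ b % 50 = 0) : sep a = sep b := by
  unfold sep
  split_ifs <;> tauto

lemma fmtFrom_congr (xs : List Char) : ∀ p q, (∀ r, r < xs.length → sep (p + r) = sep (q + r)) →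
    fmtFrom p xs = fmtFrom q xs := by
  induction xs with
  | nil => intro p q _; rfl
  | cons c cs ih =>
    intro p q h
    have h0 := h 0 (by simp)
    simp at h0
    simp [fmtFrom, h0]
    exact ih (p + 1) (q + 1) (fun r hr => by
      have := h (r + 1) (by simpa using Nat.succ_lt_succ hr)
      simpa [Nat.add_assoc, Nat.add_comm 1 r] using this)

lemma fmtFrom_id (xs : List Char) : ∀ p, (∀ r, r < xs.length → sep (p + r) = []) →
    fmtFrom p xs = xs := by
  induction xs with
  | nil => intro p _; rfl
  | cons c cs ih =>
    intro p h
    have h0 := h 0 (by simp)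
    simp at h0
    simp [fmtFrom, h0]
    exact ih (p + 1) (fun r hr => by
      have := h (r + 1) (by simpa using Nat.succ_lt_succ hr)
      simpa [Nat.add_assoc, Nat.add_comm 1 r] using this)

lemma fmtFrom_append (a b : List Char) : ∀ p,
    fmtFrom p (a ++ b) = fmtFrom p a ++ fmtFrom (p + a.length) b := by
  induction a with
  | nil => intro p; simp [fmtFrom]
  | cons c cs ih =>
    intro p
    simp [fmtFrom, ih (p + 1)]
    ring_nf

lemma sep_small (r : Nat) (h : r < 10) : sep r = [] := by
  unfold sep; rw [if_pos (by omega)]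

lemma fmt_prefix (xs : List Char) (h : xs.length ≤ 10) : fmtFrom 0 xs = xs :=
  fmtFrom_id xs 0 (fun r hr => by simpa using sep_small r (by omega))

lemma fmtFrom10 (c : Char) (cs : List Char) (h : cs.length ≤ 39) :
    fmtFrom 10 (c :: cs) = ' ' :: fmtFrom 0 (c :: cs) := by
  have h1 : fmtFrom 11 cs = fmtFrom 1 cs :=
    fmtFrom_congr cs 11 1 (fun r hr => sep_congr _ _ (by omega) (by omega) (by omega))
  simp [fmtFrom, h1, show sep 10 = [' '] from by decide, show sep 0 = [] from by decide]

lemma fmtFrom50 (c : Char) (cs : List Char) :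
    fmtFrom 50 (c :: cs) = ' ' :: '\n' :: fmtFrom 0 (c :: cs) := by
  have h1 : fmtFrom 51 cs = fmtFrom 1 cs :=
    fmtFrom_congr cs 51 1 (fun r hr => sep_congr _ _ (by omega) (by omega) (by omega))
  simp [fmtFrom, h1, show sep 50 = [' ', '\n'] from by decide, show sep 0 = [] from by decide]

lemma chunks_length_le {α : Type} (k : Nat) (hk : 0 < k) :
    ∀ (m : Nat) (l : List α), l.length ≤ k * m → (chunks k l).length ≤ m := by
  intro m
  induction m with
  | zero =>
    intro l h
    have : l = [] := List.eq_nil_of_length_eq_zero (by omega)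
    simp [this, chunks_nil]
  | succ m ih =>
    intro l h
    have hms : k * (m + 1) = k * m + k := Nat.mul_succ k m
    rcases eq_or_ne l [] with rfl | hne
    · simp [chunks_nil]
    · rw [chunks_cons k l hk hne]
      have := ih (l.drop k) (by simp [List.length_drop]; omega)
      simp [List.length_cons]
      omega

lemma chunks_length_eq {α : Type} (k : Nat) (hk : 0 < k) :
    ∀ (m : Nat) (l : List α), l.length = k * m → (chunks k l).length = m := by
  intro m
  induction m with
  | zero =>
    intro l h
    have : l = [] := List.eq_nil_of_length_eq_zero (by omega)
    simp [this, chunks_nil]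
  | succ m ih =>
    intro l h
    have hms : k * (m + 1) = k * m + k := Nat.mul_succ k m
    have hne : l ≠ [] := by
      intro hl; rw [hl] at h; simp at h; omega
    rw [chunks_cons k l hk hne]
    have := ih (l.drop k) (by simp [List.length_drop]; omega)
    simp [List.length_cons, this]

lemma chunks_append {α : Type} (k : Nat) (hk : 0 < k) :
    ∀ (m : Nat) (a b : List α), a.length = k * m → b ≠ [] →
      chunks k (a ++ b) = chunks k a ++ chunks k b := by
  intro m
  induction m with
  | zero =>
    intro a b ha hb
    have : a = [] := List.eq_nil_of_length_eq_zero (by omega)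
    simp [this, chunks_nil]
  | succ m ih =>
    intro a b ha hb
    have hms : k * (m + 1) = k * m + k := Nat.mul_succ k m
    have hane : a ≠ [] := by intro h; rw [h] at ha; simp at ha; omega
    have habne : a ++ b ≠ [] := by simp [hane]
    have hka : k ≤ a.length := by omega
    rw [chunks_cons k (a ++ b) hk habne, chunks_cons k a hk hane]
    rw [List.take_append_of_le_length hka, List.drop_append_of_le_length hka]
    rw [ih (a.drop k) b (by simp [List.length_drop]; omega) hb]
    simp

-- A's fold computes the counters and the canonical formatted text
lemma A_fold (l : List Char) :
    l.foldl aStep (0, 0, []) = (iOf l.length, kOf l.length, fmtFrom 0 l) := by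
  induction l using List.reverseRecOn with
  | nil => simp [iOf, kOf, fmtFrom]
  | append_singleton l c ih =>
    rw [List.foldl_append, ih]
    simp only [List.foldl_cons, List.foldl_nil]
    rw [fmtFrom_append]
    simp only [List.length_append, List.length_cons, List.length_nil]
    set n := l.length with hn
    have hfmt1 : fmtFrom (0 + n) [c] = sep n ++ [c] := by simp [fmtFrom]
    rw [hfmt1]
    rcases Nat.eq_zero_or_pos n with h0 | hpos
    · simp [aStep, iOf, kOf, sep, h0]
    · by_cases h10 : n % 10 = 0
      · by_cases h50 : n % 50 = 0
        · -- space then newline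
          have hi : iOf n = 10 := by unfold iOf; rw [if_neg (by omega)]; omega
          have hk : kOf n = 4 := by unfold kOf; rw [if_neg (by omega)]; omega
          have hi' : iOf (n + 1) = 1 := by unfold iOf; rw [if_neg (by omega)]; omega
          have hk' : kOf (n + 1) = 0 := by unfold kOf; rw [if_neg (by omega)]; omega
          have hs : sep n = [' ', '\n'] := by unfold sep; rw [if_neg (by omega), if_pos h50]
          simp [aStep, hi, hk, hi', hk', hs]
        · -- space only
          have hi : iOf n = 10 := by unfold iOf; rw [if_neg (by omega)]; omega
          have hk4 : kOf n ≠ 4 := by unfold kOf; rw [if_neg (by omega)]; omega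
          have hklt : kOf n < 5 := by unfold kOf; rw [if_neg (by omega)]; omega
          have hi' : iOf (n + 1) = 1 := by unfold iOf; rw [if_neg (by omega)]; omega
          have hk' : kOf (n + 1) = kOf n + 1 := by
            unfold kOf; rw [if_neg (by omega), if_neg (by omega)]; omega
          have hs : sep n = [' '] := by unfold sep; rw [if_neg (by omega), if_neg h50]
          simp [aStep, hi, hi', hk', hs, show ¬ (kOf n + 1 = 5) from by omega]
      · -- no separator
        have hi10 : iOf n ≠ 10 := by unfold iOf; rw [if_neg (by omega)]; omega
        have hklt : kOf n < 5 := by unfold kOf; rw [if_neg (by omega)]; omega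
        have hi' : iOf (n + 1) = iOf n + 1 := by
          unfold iOf; rw [if_neg (by omega), if_neg (by omega)]; omega
        have hk' : kOf (n + 1) = kOf n := by
          unfold kOf; rw [if_neg (by omega), if_neg (by omega)]; omega
        have hs : sep n = [] := by unfold sep; rw [if_pos (by omega)]
        simp [aStep, hi10, hi', hk', hs, show ¬ (kOf n = 5) from by omega]
-- pyRange with a positive step unrolls one element at a time
lemma pyRange_pos_cons (k n : Int) (hk : 0 < k) (hn : 0 < n) :
    PySem.List.pyRange 0 n k = 0 :: (PySem.List.pyRange 0 (n - k) k).map (· + k) := by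
  rw [PySem.List.pyRange_of_pos _ _ hk, PySem.List.pyRange_of_pos _ _ hk]
  have e1 : (n - 0 + k - 1) / k = (n - 1) / k + 1 := by
    rw [show n - 0 + k - 1 = (n - 1) + 1 * k by ring, Int.add_mul_ediv_right _ _ (by omega)]
  have hnn : 0 ≤ (n - 1) / k := Int.ediv_nonneg (by omega) (by omega)
  have hc : (if (0:Int) < n then ((n - 0 + k - 1) / k).toNat else 0)
      = (if (0:Int) < n - k then ((n - k - 0 + k - 1) / k).toNat else 0) + 1 := by
    rw [if_pos hn, e1]
    by_cases hkn : 0 < n - k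
    · rw [if_pos hkn, show n - k - 0 + k - 1 = n - 1 by ring]
      omega
    · rw [if_neg hkn]
      have : (n - 1) / k = 0 := Int.ediv_eq_zero_of_lt (by omega) (by omega)
      omega
  rw [hc, List.range_succ_eq_map]
  simp only [List.map_cons, List.map_map, Function.comp_def]
  refine congrArg₂ _ (by norm_num) ?_
  refine List.map_congr_left (fun t _ => ?_)
  push_cast
  ring
lemma pyRange_pos_nil (k n : Int) (hk : 0 < k) (hn : n ≤ 0) :
    PySem.List.pyRange 0 n k = [] := by
  rw [PySem.List.pyRange_of_pos _ _ hk, if_neg (by omega)]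
  simp
-- B's range/slice comprehension is exactly fixed-width chunking
lemma map_slice_chunks {α : Type} (k : Nat) (hk : 0 < k) (l : List α) :
    (PySem.List.pyRange 0 (l.length : Int) (k : Int)).map
      (fun i => PySem.List.slice l (some i) (some (i + (k : Int)))) = chunks k l := by
  have H : ∀ (n : Nat) (l : List α), l.length = n →
      (PySem.List.pyRange 0 (l.length : Int) (k : Int)).map
        (fun i => PySem.List.slice l (some i) (some (i + (k : Int)))) = chunks k l := by
    intro n
    induction n using Nat.strong_induction_on with
    | _ n ih =>
      intro l hlen
      rcases eq_or_ne l [] with rfl | hne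
      · simp [chunks_nil, pyRange_pos_nil (k : Int) 0 (by exact_mod_cast hk) le_rfl]
      · have hpos : 0 < l.length := List.length_pos_iff.mpr hne
        rw [pyRange_pos_cons (k : Int) (l.length : Int) (by exact_mod_cast hk) (by exact_mod_cast hpos)]
        rw [chunks_cons k l hk hne]
        simp only [List.map_cons, List.map_map, Function.comp_def]
        refine congrArg₂ _ ?_ ?_
        · -- head: slice l 0 (0+k) = take k l
          have : PySem.List.slice l (some ((0:Nat):Int)) (some (((0:Nat):Int) + ((k:Nat):Int)))
              = List.take k (List.drop 0 l) := PySem.List.slice_natCast_add l 0 k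
          simpa using this
        · -- tail
          by_cases hkle : k ≤ l.length
          · have hdl : (List.drop k l).length = l.length - k := by simp
            have hcast : ((l.length : Int) - (k : Int)) = (((l.length - k : Nat)) : Int) := by
              omega
            rw [hcast, ← hdl]
            rw [← ih (List.drop k l).length (by omega) (List.drop k l) rfl]
            refine List.map_congr_left (fun i hi => ?_)
            have hmem := (PySem.List.mem_pyRange_iff_of_pos (a := 0)
              (b := ((List.drop k l).length : Int)) (s := (k : Int)) (by exact_mod_cast hk) i).mp hi
            have hi0 : 0 ≤ i := by omega
            obtain ⟨j, rfl⟩ : ∃ j : Nat, (j : Int) = i := ⟨i.toNat, Int.toNat_of_nonneg hi0⟩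
            have e1 : (j : Int) + (k : Int) = (((j + k : Nat)) : Int) := by push_cast; ring
            have e2 : (((j + k : Nat)) : Int) + (k : Int) = (((j + k : Nat)) : Int) + ((k : Nat) : Int) := rfl
            rw [PySem.List.slice_natCast_add (List.drop k l) j k, e1,
              PySem.List.slice_natCast_add l (j + k) k]
            rw [List.drop_drop, Nat.add_comm k j]
          · have hklt : l.length < k := by omega
            -- l.length < k : both tails empty
            have h1 : PySem.List.pyRange 0 ((l.length : Int) - (k : Int)) (k : Int) = [] :=
              pyRange_pos_nil _ _ (by exact_mod_cast hk) (by omega)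
            have h2 : List.drop k l = [] := List.drop_eq_nil_of_le (by omega)
            simp [h1, h2, chunks_nil]
  exact H l.length l rfl
lemma line_eq (xs : List Char) (h : xs.length ≤ 50) :
    PySem.Chars.join [' '] (chunks 10 xs) = fmtFrom 0 xs := by
  have H : ∀ (n : Nat) (xs : List Char), xs.length = n → xs.length ≤ 50 →
      PySem.Chars.join [' '] (chunks 10 xs) = fmtFrom 0 xs := by
    intro n
    induction n using Nat.strong_induction_on with
    | _ n ih =>
      intro xs hlen hle
      rcases eq_or_ne xs [] with rfl | hne
      · simp [chunks_nil, PySem.Chars.join_nil, fmtFrom]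
      · have hpos : 0 < xs.length := List.length_pos_iff.mpr hne
        by_cases h10 : xs.length ≤ 10
        · rw [chunks_cons 10 xs (by omega) hne, List.take_of_length_le h10,
            List.drop_eq_nil_of_le h10, chunks_nil, PySem.Chars.join_singleton]
          exact (fmt_prefix xs h10).symm
        · have hdne : xs.drop 10 ≠ [] := by
            intro hd
            have := congrArg List.length hd
            simp at this
            omega
          have hd : chunks 10 (xs.drop 10) =
              (xs.drop 10).take 10 :: chunks 10 ((xs.drop 10).drop 10) :=
            chunks_cons 10 _ (by omega) hdne
          rw [chunks_cons 10 xs (by omega) hne, hd, PySem.Chars.join_cons_cons, ← hd]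
          rw [ih (xs.drop 10).length (by simp; omega) (xs.drop 10) rfl (by simp; omega)]
          obtain ⟨c, cs, hcc⟩ : ∃ c cs, xs.drop 10 = c :: cs := by
            cases hx : xs.drop 10 with
            | nil => exact absurd hx hdne
            | cons c cs => exact ⟨c, cs, rfl⟩
          conv_rhs => rw [← List.take_append_drop 10 xs]
          rw [fmtFrom_append, List.length_take, Nat.min_eq_left (by omega)]
          rw [hcc, fmtFrom10 c cs (by
            have := congrArg List.length hcc
            simp at this
            omega)]
          rw [fmt_prefix (List.take 10 xs) (by simp [List.length_take])]
          simp
  exact H xs.length xs rfl h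
lemma top_eq (l : List Char) :
    PySem.Chars.join [' ', '\n'] ((chunks 5 (chunks 10 l)).map (PySem.Chars.join [' '])) =
      fmtFrom 0 l := by
  have H : ∀ (n : Nat) (l : List Char), l.length = n →
      PySem.Chars.join [' ', '\n'] ((chunks 5 (chunks 10 l)).map (PySem.Chars.join [' '])) =
        fmtFrom 0 l := by
    intro n
    induction n using Nat.strong_induction_on with
    | _ n ih =>
      intro l hlen
      rcases eq_or_ne l [] with rfl | hne
      · simp [chunks_nil, PySem.Chars.join_nil, fmtFrom]
      · have hpos : 0 < l.length := List.length_pos_iff.mpr hne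
        by_cases h50 : l.length ≤ 50
        · have hgne : chunks 10 l ≠ [] := by
            rw [chunks_cons 10 l (by omega) hne]; simp
          have hglen : (chunks 10 l).length ≤ 5 :=
            chunks_length_le 10 (by omega) 5 l (by omega)
          rw [chunks_cons 5 (chunks 10 l) (by omega) hgne,
            List.take_of_length_le hglen, List.drop_eq_nil_of_le hglen, chunks_nil]
          simp only [List.map_cons, List.map_nil, PySem.Chars.join_singleton]
          exact line_eq l h50
        · have hb : l.drop 50 ≠ [] := by
            intro hd
            have := congrArg List.length hd
            simp at this
            omega
          have hsplit : chunks 10 l = chunks 10 (l.take 50) ++ chunks 10 (l.drop 50) := by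
            conv_lhs => rw [← List.take_append_drop 50 l]
            exact chunks_append 10 (by omega) 5 (l.take 50) (l.drop 50)
              (by simp [List.length_take]; omega) hb
          have hg1len : (chunks 10 (l.take 50)).length = 5 :=
            chunks_length_eq 10 (by omega) 5 (l.take 50) (by simp [List.length_take]; omega)
          have hg2ne : chunks 10 (l.drop 50) ≠ [] := by
            rw [chunks_cons 10 _ (by omega) hb]; simp
          have habne : chunks 10 (l.take 50) ++ chunks 10 (l.drop 50) ≠ [] := by
            simp [hg2ne]
          rw [hsplit, chunks_cons 5 _ (by omega) habne,
            List.take_append_of_le_length (by omega), List.take_of_length_le (by omega),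
            List.drop_append_of_le_length (by omega), List.drop_eq_nil_of_le (by omega),
            List.nil_append]
          have hg2 : chunks 5 (chunks 10 (l.drop 50)) =
              (chunks 10 (l.drop 50)).take 5 :: chunks 5 ((chunks 10 (l.drop 50)).drop 5) :=
            chunks_cons 5 _ (by omega) hg2ne
          rw [List.map_cons, hg2, List.map_cons, PySem.Chars.join_cons_cons, ← List.map_cons, ← hg2]
          rw [ih (l.drop 50).length (by simp; omega) (l.drop 50) rfl]
          rw [line_eq (l.take 50) (by simp [List.length_take])]
          obtain ⟨c, cs, hcc⟩ : ∃ c cs, l.drop 50 = c :: cs := by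
            cases hx : l.drop 50 with
            | nil => exact absurd hx hb
            | cons c cs => exact ⟨c, cs, rfl⟩
          conv_rhs => rw [← List.take_append_drop 50 l]
          rw [fmtFrom_append, List.length_take, Nat.min_eq_left (by omega)]
          rw [hcc, fmtFrom50 c cs]
          simp
  exact H l.length l rfl
-- ===== VERDICT (by name: the statement is the Claim_ definition above) =====
lemma groups_eq (l : List Char) :
    (PySem.List.pyRange 0 (l.length : Int) 10).map
      (fun i => PySem.List.slice l (some i) (some (i + 10))) = chunks 10 l := by
  have h := map_slice_chunks 10 (by norm_num) l
  push_cast at h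
  exact h

lemma groups5_eq {α : Type} (l : List α) :
    (PySem.List.pyRange 0 (l.length : Int) 5).map
      (fun i => PySem.List.slice l (some i) (some (i + 5))) = chunks 5 l := by
  have h := map_slice_chunks 5 (by norm_num) l
  push_cast at h
  exact h

theorem ArreglarCadena_spec : Claim_equal_ArreglarCadena := by
  intro cadena _
  unfold Spec_ArreglarCadena ArreglarCadena ArreglarCadena_alt
  simp only []
  rw [A_fold]
  rw [groups_eq]
  have h5 : (PySem.List.pyRange 0 (((chunks 10 cadena.toList).length : Nat) : Int) 5).map
      (fun j => PySem.Chars.join [' '] (PySem.List.slice (chunks 10 cadena.toList) (some j) (some (j + 5))))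
      = (chunks 5 (chunks 10 cadena.toList)).map (PySem.Chars.join [' ']) := by
    rw [← groups5_eq (chunks 10 cadena.toList)]
    simp [List.map_map]
  rw [h5, top_eq]
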